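-- pv_equiv track=rewrite | github.com/Arsen1302/Code-copy-detector | TestData/solutions/problem_1077_3_1.py | solution_1077_3_1
-- ===== SOURCE A (Python) =====
-- def solution_1077_3_1(s: str) -> int:
--
--     def solution_1077_3_2(i, seen=set()):
--         """Find max length via backtracking."""
--         ans = 0
--         if i < len(s): # boundary condition when i == len(s)
--             for ii in range(i+1, len(s)+1):
--                 if s[i:ii] not in seen:
--                     seen.add(s[i:ii])
--                     ans = max(ans, 1 + solution_1077_3_2(ii, seen))
--                     seen.remove(s[i:ii])
--         return ans
--
--     return solution_1077_3_2(0)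
-- ===== SOURCE B (Python) =====
-- def solution_1077_3_1(s: str) -> int:
--     """Iterative DFS with an explicit stack of frames instead of recursion.
--
--     Each frame is [start, next_cut, best]. Entering a new unseen substring
--     pushes a frame; an exhausted frame pops, restores `seen`, and folds
--     1 + its best into its parent via max."""
--     n = len(s)
--     seen = set()
--     stack = [[0, 1, 0]]
--     result = 0
--     while stack:
--         i, ii, best = stack[-1]
--         if i >= n or ii > n:
--             stack.pop()
--             if stack:
--                 parent = stack[-1]
--                 seen.remove(s[parent[0]:i])
--                 parent[2] = max(parent[2], 1 + best)
--             else: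
--                 result = best
--         else:
--             stack[-1][1] = ii + 1
--             sub = s[i:ii]
--             if sub not in seen:
--                 seen.add(sub)
--                 stack.append([ii, ii + 1, 0])
--     return result
-- ===== Notes on version B (the rewrite author's own statement) =====
-- stated objective: alternative
-- what changed: A's recursive backtracking is replaced by an iterative DFS over an explicit stack of (start, next-cut, best) frames that restores the shared seen set on every pop and folds 1+child best into the parent via max.
import Mathlib
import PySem

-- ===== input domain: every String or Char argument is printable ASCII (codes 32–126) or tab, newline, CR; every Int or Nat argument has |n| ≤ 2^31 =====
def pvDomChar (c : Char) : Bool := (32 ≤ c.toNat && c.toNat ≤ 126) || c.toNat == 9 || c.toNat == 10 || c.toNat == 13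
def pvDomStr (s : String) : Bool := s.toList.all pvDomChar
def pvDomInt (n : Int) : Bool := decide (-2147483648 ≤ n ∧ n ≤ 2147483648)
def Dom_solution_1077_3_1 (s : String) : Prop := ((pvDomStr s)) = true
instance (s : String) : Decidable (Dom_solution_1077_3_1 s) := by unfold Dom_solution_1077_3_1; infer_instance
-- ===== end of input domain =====

-- B replaces A's recursive backtracking by an iterative DFS over an explicit stack of
-- frames (start, next cut, best), restoring `seen` on every pop (objective: alternative,
-- same search tree and cost).

-- ===== PORT A =====
-- fuel is only a totality guard: fuel ≥ len(s) - i on every reachable call, and when it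
-- is exhausted i ≥ len(s) already holds, so the 0 returned is Python's value there too.
def goA (cs : List Char) : Nat → Int → List (List Char) → Int
  | 0, _, _ => 0
  | fuel+1, i, seen =>
    if i < (cs.length : Int) then
      (PySem.List.pyRange (i+1) ((cs.length : Int)+1) 1).foldl
        (fun ans ii =>
          let sub := PySem.List.slice cs (some i) (some ii)
          if PySem.Set.contains seen sub then ans
          else max ans (1 + goA cs fuel ii (PySem.Set.add seen sub)))
        0
    else 0

def solution_1077_3_1 (s : String) : Int := goA s.toList s.toList.length 0 []

-- ===== PORT B =====
-- Python B's `seen.remove(sub)` fires only when sub is present (it was added when the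
-- popped frame was pushed), so Set.discard is exact there; fuel 2^(n+1) is a totality
-- guard that provably exceeds the number of machine steps.
def runB (cs : List Char) (n : Nat) : Nat → List (Nat × Nat × Int) → List (List Char) → Int → Int
  | 0, _, _, result => result
  | fuel+1, stack, seen, result =>
    match stack with
    | [] => result
    | (i, ii, best) :: rest =>
      if n ≤ i ∨ n < ii then
        match rest with
        | [] => runB cs n fuel [] seen best
        | (pi, pii, pbest) :: rest' =>
          let sub := PySem.List.slice cs (some (pi : Int)) (some (i : Int))
          runB cs n fuel ((pi, pii, max pbest (1 + best)) :: rest') (PySem.Set.discard seen sub) result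
      else
        let sub := PySem.List.slice cs (some (i : Int)) (some (ii : Int))
        if PySem.Set.contains seen sub then
          runB cs n fuel ((i, ii+1, best) :: rest) seen result
        else
          runB cs n fuel ((ii, ii+1, 0) :: (i, ii+1, best) :: rest) (PySem.Set.add seen sub) result

def solution_1077_3_1_alt (s : String) : Int :=
  runB s.toList s.toList.length (2 ^ (s.toList.length + 1)) [(0, 1, 0)] [] 0

-- ===== PRECONDITION & SPEC =====
def Spec_solution_1077_3_1 (s : String) (out : Int) : Prop := out = solution_1077_3_1_alt s
instance (s : String) (out : Int) : Decidable (Spec_solution_1077_3_1 s out) := by unfold Spec_solution_1077_3_1; infer_instance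

-- ===== CLAIM (what is proved, stated in full; the proofs are below) =====
def Claim_equal_solution_1077_3_1 : Prop := ∀ (s : String), Dom_solution_1077_3_1 s → Spec_solution_1077_3_1 s (solution_1077_3_1 s)

-- ===== LEMMAS AND PROOFS =====

-- Ideal (fuel-free) semantics of A's backtracking: F is the for-loop from cut position
-- ii with accumulator b, G is the recursive call at position i.
mutual
def specF (cs : List Char) (i ii : Nat) (b : Int) (seen : List (List Char)) : Int :=
  if h : ii ≤ cs.length then
    specF cs i (ii+1)
      (if (PySem.List.slice cs (some (i : Int)) (some (ii : Int))) ∈ seen then b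
       else max b (1 + specG cs ii (PySem.Set.add seen (PySem.List.slice cs (some (i : Int)) (some (ii : Int))))))
      seen
  else b
termination_by (cs.length + 1 - ii, 1)
decreasing_by
  · apply Prod.Lex.right; omega
  · apply Prod.Lex.left; omega

def specG (cs : List Char) (i : Nat) (seen : List (List Char)) : Int :=
  if h : i < cs.length then specF cs i (i+1) 0 seen else 0
termination_by (cs.length + 1 - i, 0)
decreasing_by apply Prod.Lex.left; omega
end

-- Unwinding a machine state: the value the machine will return from this state.
def ansB (cs : List Char) : List (Nat × Nat × Int) → List (List Char) → Int → Int
  | [], _, r => r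
  | (i, ii, b) :: rest, seen, r =>
    match rest with
    | [] => specF cs i ii b seen
    | (pi, pii, pb) :: rest' =>
      ansB cs ((pi, pii, max pb (1 + specF cs i ii b seen)) :: rest')
        (PySem.Set.discard seen (PySem.List.slice cs (some (pi : Int)) (some (i : Int)))) r
termination_by stack _ _ => stack.length
decreasing_by simp_wf

-- Step-count potential of a machine state.
def gpot (n ii : Nat) : Nat := 2 ^ (n + 2 - ii) - 2
def mpot (n : Nat) (stack : List (Nat × Nat × Int)) : Nat :=
  stack.length + (stack.map (fun f => gpot n f.2.1)).sum

-- Machine invariant: an exhausted start index means an exhausted cut index.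
def invB (n : Nat) (stack : List (Nat × Nat × Int)) : Prop :=
  ∀ f ∈ stack, n ≤ f.1 → n < f.2.1

lemma gpot_succ_lt {n ii : Nat} (h : ii ≤ n) : gpot n (ii+1) < gpot n ii := by
  unfold gpot
  have e2 : n + 2 - (ii + 1) = n + 1 - ii := by omega
  rw [e2]
  have e1 : n + 2 - ii = (n + 1 - ii) + 1 := by omega
  rw [e1, pow_succ]
  have : 1 < 2 ^ (n + 1 - ii) := Nat.one_lt_two_pow_iff.mpr (by omega)
  omega

lemma gpot_push {n ii : Nat} (h : ii ≤ n) : 1 + 2 * gpot n (ii+1) < gpot n ii := by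
  unfold gpot
  have e2 : n + 2 - (ii + 1) = n + 1 - ii := by omega
  rw [e2]
  have e1 : n + 2 - ii = (n + 1 - ii) + 1 := by omega
  have e3 : n + 1 - ii ≠ 0 := by omega
  have h2 : 1 < 2 ^ (n + 1 - ii) := Nat.one_lt_two_pow_iff.mpr e3
  rw [e1, pow_succ]
  omega

lemma discard_add_self {sub : List Char} {seen : List (List Char)} (h : sub ∉ seen) :
    PySem.Set.discard (PySem.Set.add seen sub) sub = seen := by
  rw [PySem.Set.add_of_not_mem h]
  simp only [PySem.Set.discard, List.filter_append]
  have h1 : List.filter (fun y => !y == sub) [sub] = [] := by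
    simp only [List.filter_cons, List.filter_nil]
    simp
  have h2 : List.filter (fun y => !y == sub) seen = seen := by
    rw [List.filter_eq_self]
    intro a ha
    simp only [Bool.not_eq_eq_eq_not, Bool.not_true, beq_eq_false_iff_ne, ne_eq]
    exact fun hx => h (hx ▸ ha)
  rw [h1, h2, List.append_nil]

lemma specG_eq_specF (cs : List Char) (ii : Nat) (seen : List (List Char)) (h : ii ≤ cs.length) :
    specG cs ii seen = specF cs ii (ii+1) 0 seen := by
  rw [specG]
  by_cases hlt : ii < cs.length
  · rw [dif_pos hlt]
  · have : ii = cs.length := by omega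
    rw [dif_neg hlt, specF, dif_neg (by omega)]

lemma ansB_congr (cs : List Char) (i ii ii' : Nat) (b b' : Int)
    (rest : List (Nat × Nat × Int)) (seen : List (List Char)) (r : Int)
    (h : specF cs i ii b seen = specF cs i ii' b' seen) :
    ansB cs ((i, ii, b) :: rest) seen r = ansB cs ((i, ii', b') :: rest) seen r := by
  cases rest with
  | nil => simp only [ansB, h]
  | cons p rest' =>
    obtain ⟨pi, pii, pb⟩ := p
    simp only [ansB, h]

-- A's loop from cut position c equals specF.
lemma loopA_eq (cs : List Char) (fuel : Nat)
    (hIH : ∀ (j : Nat) (seen : List (List Char)), cs.length - j ≤ fuel →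
      goA cs fuel (j : Int) seen = specG cs j seen) :
    ∀ (k c : Nat) (i : Nat) (b : Int) (seen : List (List Char)),
      cs.length + 1 - c ≤ k → i < c → cs.length - i ≤ fuel + 1 →
      (PySem.List.pyRange (c : Int) ((cs.length : Int)+1) 1).foldl
        (fun ans ii =>
          let sub := PySem.List.slice cs (some (i : Int)) (some ii)
          if PySem.Set.contains seen sub then ans
          else max ans (1 + goA cs fuel ii (PySem.Set.add seen sub)))
        b = specF cs i c b seen := by
  intro k
  induction k with
  | zero =>
    intro c i b seen hk hic hfi
    rw [PySem.List.pyRange_one_eq_nil (by exact_mod_cast (by omega : cs.length + 1 ≤ c))]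
    rw [List.foldl_nil, specF, dif_neg (by omega)]
  | succ k ih =>
    intro c i b seen hk hic hfi
    by_cases hc : c ≤ cs.length
    · rw [PySem.List.pyRange_one_cons (by exact_mod_cast (by omega : c < cs.length + 1))]
      rw [List.foldl_cons]
      have hcast : (c : Int) + 1 = ((c + 1 : Nat) : Int) := by push_cast; ring
      rw [hcast]
      have hrec : goA cs fuel (c : Int) (PySem.Set.add seen (PySem.List.slice cs (some (i : Int)) (some (c : Int))))
          = specG cs c (PySem.Set.add seen (PySem.List.slice cs (some (i : Int)) (some (c : Int)))) :=
        hIH c _ (by omega)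
      simp only [hrec]
      rw [ih (c+1) i _ seen (by omega) (by omega) hfi]
      conv_rhs => rw [specF]
      rw [dif_pos hc]
      by_cases hmem : PySem.List.slice cs (some (i : Int)) (some (c : Int)) ∈ seen
      · rw [if_pos hmem,
          if_pos ((PySem.Set.contains_iff seen _).mpr hmem)]
      · rw [if_neg hmem,
          if_neg (by rw [PySem.Set.contains_iff]; exact hmem)]
    · rw [PySem.List.pyRange_one_eq_nil (by exact_mod_cast (by omega : cs.length + 1 ≤ c))]
      rw [List.foldl_nil, specF, dif_neg (by omega)]

lemma goA_eq (cs : List Char) :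
    ∀ (fuel : Nat) (i : Nat) (seen : List (List Char)), cs.length - i ≤ fuel →
      goA cs fuel (i : Int) seen = specG cs i seen := by
  intro fuel
  induction fuel with
  | zero =>
    intro i seen hf
    rw [goA, specG, dif_neg (by omega)]
  | succ fuel ih =>
    intro i seen hf
    by_cases hi : i < cs.length
    · rw [goA, if_pos (by exact_mod_cast hi), specG, dif_pos hi]
      have hcast : (i : Int) + 1 = ((i + 1 : Nat) : Int) := by push_cast; ring
      rw [hcast]
      exact loopA_eq cs fuel ih (cs.length + 1 - (i+1)) (i+1) i 0 seen (by omega) (by omega) (by omega)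
    · rw [goA, if_neg (by exact_mod_cast hi), specG, dif_neg hi]

-- The machine computes ansB.
lemma runB_eq_ansB (cs : List Char) :
    ∀ (fuel : Nat) (stack : List (Nat × Nat × Int)) (seen : List (List Char)) (r : Int),
      invB cs.length stack → mpot cs.length stack < fuel →
      runB cs cs.length fuel stack seen r = ansB cs stack seen r := by
  intro fuel
  induction fuel with
  | zero => intro stack seen r _ hm; omega
  | succ fuel ih =>
    intro stack seen r hinv hm
    cases stack with
    | nil => simp only [runB, ansB]
    | cons f rest =>
      obtain ⟨i, ii, b⟩ := f
      by_cases hcond : cs.length ≤ i ∨ cs.length < ii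
      · -- pop
        have hii : cs.length < ii := by
          rcases hcond with h | h
          · exact hinv (i, ii, b) (by simp) h
          · exact h
        have hFb : specF cs i ii b seen = b := by rw [specF, dif_neg (by omega)]
        cases rest with
        | nil =>
          simp only [runB]
          rw [if_pos hcond]
          rw [ih [] seen b (by intro f hf; cases hf)
            (by
              simp only [mpot, List.length_nil, List.map_nil, List.sum_nil, List.length_cons,
                List.map_cons, List.sum_cons] at hm ⊢
              omega)]
          simp only [ansB, hFb]
        | cons p rest' =>
          obtain ⟨pi, pii, pb⟩ := p
          simp only [runB]
          rw [if_pos hcond]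
          rw [ih ((pi, pii, max pb (1 + b)) :: rest') _ r
            (by
              intro f hf
              rcases List.mem_cons.mp hf with h | h
              · subst h; exact hinv (pi, pii, pb) (by simp)
              · exact hinv f (by simp [h]))
            (by
              simp only [mpot, List.length_cons, List.map_cons, List.sum_cons] at hm ⊢
              omega)]
          simp only [ansB, hFb]
      · -- advance
        push Not at hcond
        obtain ⟨hi, hiile⟩ := hcond
        have hiile : ii ≤ cs.length := hiile
        have hi : i < cs.length := by omega
        simp only [runB]
        rw [if_neg (by omega)]
        by_cases hmem : PySem.List.slice cs (some (i : Int)) (some (ii : Int)) ∈ seen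
        · rw [if_pos ((PySem.Set.contains_iff seen _).mpr hmem)]
          rw [ih ((i, ii+1, b) :: rest) seen r
            (by
              intro f hf
              rcases List.mem_cons.mp hf with h | h
              · subst h; intro hle; omega
              · exact hinv f (by simp [h]))
            (by
              have := gpot_succ_lt (n := cs.length) (ii := ii) hiile
              simp only [mpot, List.length_cons, List.map_cons, List.sum_cons] at hm ⊢
              omega)]
          refine (ansB_congr cs i ii (ii+1) b b rest seen r ?_).symm
          rw [specF, dif_pos hiile, if_pos hmem]
        · rw [if_neg (by rw [PySem.Set.contains_iff]; exact hmem)]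
          rw [ih ((ii, ii+1, 0) :: (i, ii+1, b) :: rest) _ r
            (by
              intro f hf
              rcases List.mem_cons.mp hf with h | h
              · subst h; intro hle; simp only; omega
              · rcases List.mem_cons.mp h with h2 | h2
                · subst h2; intro hle; omega
                · exact hinv f (by simp [h2]))
            (by
              have := gpot_push (n := cs.length) (ii := ii) hiile
              simp only [mpot, List.length_cons, List.map_cons, List.sum_cons] at hm ⊢
              omega)]
          simp only [ansB]
          rw [discard_add_self hmem]
          refine ansB_congr cs i (ii+1) ii _ b rest seen r ?_
          conv_rhs => rw [specF]
          rw [dif_pos hiile, if_neg hmem,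
            specG_eq_specF cs ii _ hiile]

-- ===== VERDICT (by name: the statement is the Claim_ definition above) =====
theorem solution_1077_3_1_spec : Claim_equal_solution_1077_3_1 := by
  intro s _
  unfold Spec_solution_1077_3_1 solution_1077_3_1 solution_1077_3_1_alt
  have hA := goA_eq s.toList s.toList.length 0 [] (by omega)
  rw [Nat.cast_zero] at hA
  rw [hA]
  rw [runB_eq_ansB s.toList (2 ^ (s.toList.length + 1)) [(0, 1, 0)] [] 0
    (by
      rintro ⟨a, b, c⟩ hf
      simp only [List.mem_cons, List.not_mem_nil, or_false, Prod.mk.injEq] at hf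
      obtain ⟨h1, h2, h3⟩ := hf
      subst h1; subst h2
      intro h
      dsimp only at h ⊢
      omega)
    (by
      simp only [mpot, gpot, List.length_cons, List.length_nil, List.map_cons, List.map_nil,
        List.sum_cons, List.sum_nil]
      have e : s.toList.length + 2 - 1 = s.toList.length + 1 := by omega
      rw [e]
      have : 1 < 2 ^ (s.toList.length + 1) := Nat.one_lt_two_pow_iff.mpr (by omega)
      omega)]
  simp only [ansB]
  by_cases hn : 0 < s.toList.length
  · rw [specG, dif_pos hn]
  · rw [specG, dif_neg hn, specF, dif_neg (by omega)]
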